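-- pv_equiv track=rewrite | github.com/WallerTsai/OJ-Solution | leetcode-py/动态规划/数位dp/No3906.py | countGoodIntegersOnPath
-- ===== SOURCE A (Python) =====
-- from functools import cache
--
-- def countGoodIntegersOnPath(l: int, r: int, directions: str) -> int:
--     li = [0]
--     i = 0
--     for dir in directions:
--         if dir == "R":
--             i += 1
--         else:
--             i += 4
--         li.append(i)
--
--     _set = set(li)
--
--     m = 16
--     low_s = list(map(int, str(l)))
--     low_s = [0 for _ in range(m - len(low_s))] + low_s
--     high_s = list(map(int, str(r)))
--     high_s = [0 for _ in range(m - len(high_s))] + high_s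
--     # diff_lh = n - len(low_s)
--
--     @cache
--     def dfs(i: int, pre: int, limit_low: bool, limit_high: bool) -> int:
--         if i == m:
--             return 1
--         lo = low_s[i] if limit_low else 0
--         hi = high_s[i] if limit_high else 9
--
--         start = lo
--         flag = False
--         if i in _set:
--             flag = True
--             start = max(lo, pre) if i > 0 else lo
--         res = 0
--         for d in range(start, hi + 1):
--             res += dfs(i + 1,
--                        d if flag else pre,
--                        limit_low and d == lo,
--                        limit_high and d == hi)
--
--         return res
--
--     ans = dfs(0, -1, True, True)
--     dfs.cache_clear()
--
--     return ans
-- ===== SOURCE B (Python) =====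
-- from functools import cache
--
-- def countGoodIntegersOnPath(l: int, r: int, directions: str) -> int:
--     # Prefix-count decomposition: answer = g(r) - g(l-1), where g(x) counts
--     # integers in [0, x] (16-digit zero-padded) whose digits at the marked
--     # positions are non-decreasing; g uses a single-bound digit DP.
--     marked = {0}
--     pos = 0
--     for c in directions:
--         pos += 1 if c == "R" else 4
--         marked.add(pos)
--
--     M = 16
--
--     def g(x: int) -> int:
--         if x < 0:
--             return 0
--         ds = [x // 10 ** (M - 1 - j) % 10 for j in range(M)]
--
--         @cache
--         def dfs(j: int, pre: int, tight: bool) -> int: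
--             if j == M:
--                 return 1
--             hi = ds[j] if tight else 9
--             total = 0
--             if j in marked:
--                 for d in range(max(pre, 0), hi + 1):
--                     total += dfs(j + 1, d, tight and d == hi)
--             else:
--                 for d in range(hi + 1):
--                     total += dfs(j + 1, pre, tight and d == hi)
--             return total
--
--         return dfs(0, -1, True)
--
--     if l > r:
--         return 0
--     return g(r) - g(l - 1)
-- ===== Notes on version B (the rewrite author's own statement) =====
-- stated objective: alternative
-- what changed: Replaces A's single two-bound digit DP dfs(i,pre,limit_low,limit_high) over [l,r] by a prefix-count decomposition g(r) - g(l-1), where g is a single-bound digit DP dfs(j,pre,tight) over [0,x] with arithmetically extracted (divmod) digits instead of str()-parsing, plus an explicit l > r guard.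
import Mathlib
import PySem

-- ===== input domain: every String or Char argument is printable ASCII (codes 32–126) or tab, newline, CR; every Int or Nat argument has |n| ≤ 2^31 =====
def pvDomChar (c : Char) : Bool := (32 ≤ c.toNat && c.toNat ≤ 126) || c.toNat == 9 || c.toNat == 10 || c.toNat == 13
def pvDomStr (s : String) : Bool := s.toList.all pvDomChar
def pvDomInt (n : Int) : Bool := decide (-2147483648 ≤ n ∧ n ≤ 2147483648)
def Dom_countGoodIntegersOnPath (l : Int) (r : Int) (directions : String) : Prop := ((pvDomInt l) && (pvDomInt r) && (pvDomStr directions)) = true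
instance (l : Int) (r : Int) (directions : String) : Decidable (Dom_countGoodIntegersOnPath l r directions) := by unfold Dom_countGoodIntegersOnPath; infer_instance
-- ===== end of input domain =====

-- B replaces A's two-bound digit DP dfs(i,pre,limit_low,limit_high) by the prefix-count
-- decomposition g(r) - g(l-1) with a single-bound digit DP (objective: alternative, not faster).

-- ===== PORT A =====
-- int(c) for the decimal-digit characters produced by str(l), l >= 0 (exact there;
-- for l < 0 Python's int('-') raises ValueError, excluded by Pre_).
def pvDigitVal (c : Char) : Int := (c.toNat : Int) - 48

-- dfs(i, pre, limit_low, limit_high) with its @cache: the two 16-digit lists are walked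
-- structurally in lockstep with i (the empty-list case is Python's `i == m` base case);
-- the cache is threaded as an explicit memo dictionary keyed like functools.cache.
def pvDfsAC (st : PySem.Set Int) : List Int → List Int → Int → Int → Bool → Bool →
    PySem.Dict (Int × Int × Bool × Bool) Int → Int × PySem.Dict (Int × Int × Bool × Bool) Int
  | l0 :: lt, h0 :: ht, i, pre, limitLow, limitHigh, memo =>
    match PySem.Dict.get? memo (i, pre, limitLow, limitHigh) with
    | some v => (v, memo)
    | none =>
      let lo := if limitLow then l0 else 0
      let hi := if limitHigh then h0 else 9
      let flag := PySem.Set.contains st i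
      let start := if flag then (if 0 < i then max lo pre else lo) else lo
      let p := (PySem.List.pyRange start (hi + 1)).foldl
        (fun (acc : Int × PySem.Dict (Int × Int × Bool × Bool) Int) d =>
          let r := pvDfsAC st lt ht (i + 1) (if flag then d else pre)
            (limitLow && (d == lo)) (limitHigh && (d == hi)) acc.2
          (acc.1 + r.1, r.2)) (0, memo)
      (p.1, PySem.Dict.insert p.2 (i, pre, limitLow, limitHigh) p.1)
  | _, _, _, _, _, _, memo => (1, memo)

def countGoodIntegersOnPath (l : Int) (r : Int) (directions : String) : Int :=
  let liI : List Int × Int := directions.toList.foldl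
    (fun (s : List Int × Int) dir =>
      let i := if dir = 'R' then s.2 + 1 else s.2 + 4
      (s.1 ++ [i], i)) ([0], 0)
  let st : PySem.Set Int := PySem.Set.ofList liI.1
  let low0 : List Int := (PySem.Int.toChars l).map pvDigitVal
  let low_s : List Int := List.replicate (16 - low0.length) 0 ++ low0
  let high0 : List Int := (PySem.Int.toChars r).map pvDigitVal
  let high_s : List Int := List.replicate (16 - high0.length) 0 ++ high0
  (pvDfsAC st low_s high_s 0 (-1) true true PySem.Dict.empty).1

-- ===== PORT B =====
-- dfs(j, pre, tight) of Source B with its @cache: one bound, walked structurally over the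
-- digit list, the cache threaded as an explicit memo dictionary keyed like functools.cache.
def pvDfsBC (marked : PySem.Set Int) : List Int → Int → Int → Bool →
    PySem.Dict (Int × Int × Bool) Int → Int × PySem.Dict (Int × Int × Bool) Int
  | d0 :: dt, j, pre, tight, memo =>
    match PySem.Dict.get? memo (j, pre, tight) with
    | some v => (v, memo)
    | none =>
      let hi := if tight then d0 else 9
      let p :=
        if PySem.Set.contains marked j then
          (PySem.List.pyRange (max pre 0) (hi + 1)).foldl
            (fun (acc : Int × PySem.Dict (Int × Int × Bool) Int) d =>
              let r := pvDfsBC marked dt (j + 1) d (tight && (d == hi)) acc.2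
              (acc.1 + r.1, r.2)) (0, memo)
        else
          (PySem.List.pyRange 0 (hi + 1)).foldl
            (fun (acc : Int × PySem.Dict (Int × Int × Bool) Int) d =>
              let r := pvDfsBC marked dt (j + 1) pre (tight && (d == hi)) acc.2
              (acc.1 + r.1, r.2)) (0, memo)
      (p.1, PySem.Dict.insert p.2 (j, pre, tight) p.1)
  | [], _, _, _, memo => (1, memo)

-- [x // 10 ** (16 - 1 - j) % 10 for j in range(16)]  (j ranges over 0..15, so the
-- exponent 15 - j is a nonnegative int; `.toNat` is exact there).
def pvDigitsB (x : Int) : List Int :=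
  (PySem.List.pyRange 0 16).map
    (fun j => PySem.Int.mod (PySem.Int.floordiv x ((10 : Int) ^ ((15 : Int) - j).toNat)) 10)

def pvG (marked : PySem.Set Int) (x : Int) : Int :=
  if x < 0 then 0 else (pvDfsBC marked (pvDigitsB x) 0 (-1) true PySem.Dict.empty).1

def countGoodIntegersOnPath_alt (l : Int) (r : Int) (directions : String) : Int :=
  let marked : PySem.Set Int × Int := directions.toList.foldl
    (fun (s : PySem.Set Int × Int) c =>
      let pos := s.2 + (if c = 'R' then 1 else 4)
      (PySem.Set.add s.1 pos, pos)) (PySem.Set.add PySem.Set.empty 0, 0)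
  if l > r then 0 else pvG marked.1 r - pvG marked.1 (l - 1)

-- ===== PRECONDITION & SPEC =====
-- Pre_ excludes exactly the inputs where A raises: for l < 0 or r < 0, str(·) contains
-- '-' and list(map(int, str(·))) raises ValueError.
def Pre_countGoodIntegersOnPath (l : Int) (r : Int) (directions : String) : Prop :=
  0 ≤ l ∧ 0 ≤ r
instance (l : Int) (r : Int) (directions : String) : Decidable (Pre_countGoodIntegersOnPath l r directions) := by unfold Pre_countGoodIntegersOnPath; infer_instance

def pvWitness_countGoodIntegersOnPath : Int × Int × String := (0, 3, "R")


def Spec_countGoodIntegersOnPath (l : Int) (r : Int) (directions : String) (out : Int) : Prop := out = countGoodIntegersOnPath_alt l r directions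
instance (l : Int) (r : Int) (directions : String) (out : Int) : Decidable (Spec_countGoodIntegersOnPath l r directions out) := by unfold Spec_countGoodIntegersOnPath; infer_instance

-- ===== CLAIM (what is proved, stated in full; the proofs are below) =====
def Claim_equal_countGoodIntegersOnPath : Prop := ∀ (l : Int) (r : Int) (directions : String), Dom_countGoodIntegersOnPath l r directions → Pre_countGoodIntegersOnPath l r directions → Spec_countGoodIntegersOnPath l r directions (countGoodIntegersOnPath l r directions)


-- ===== LEMMAS AND PROOFS =====
-- The memo-free versions of the two DPs (what dfs computes ignoring the cache);
-- the ports are proved equal to them in pvDfsAC_correct / pvDfsBC_correct below.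
def pvDfsA (st : PySem.Set Int) : List Int → List Int → Int → Int → Bool → Bool → Int
  | l0 :: lt, h0 :: ht, i, pre, limitLow, limitHigh =>
    let lo := if limitLow then l0 else 0
    let hi := if limitHigh then h0 else 9
    let flag := PySem.Set.contains st i
    let start := if flag then (if 0 < i then max lo pre else lo) else lo
    (PySem.List.pyRange start (hi + 1)).foldl
      (fun res d => res + pvDfsA st lt ht (i + 1) (if flag then d else pre)
          (limitLow && (d == lo)) (limitHigh && (d == hi))) 0
  | _, _, _, _, _, _ => 1

def pvDfsB (marked : PySem.Set Int) : List Int → Int → Int → Bool → Int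
  | d0 :: dt, j, pre, tight =>
    let hi := if tight then d0 else 9
    if PySem.Set.contains marked j then
      (PySem.List.pyRange (max pre 0) (hi + 1)).foldl
        (fun total d => total + pvDfsB marked dt (j + 1) d (tight && (d == hi))) 0
    else
      (PySem.List.pyRange 0 (hi + 1)).foldl
        (fun total d => total + pvDfsB marked dt (j + 1) pre (tight && (d == hi))) 0
  | [], _, _, _ => 1





def pvS (a b : Int) (f : Int → Int) : Int := ((PySem.List.pyRange a b).map f).sum

theorem pvS_empty {a b : Int} (h : b ≤ a) (f : Int → Int) : pvS a b f = 0 := by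
  simp [pvS, PySem.List.pyRange_one_eq_nil h]

theorem pvS_split {a m b : Int} (h1 : a ≤ m) (h2 : m ≤ b) (f : Int → Int) :
    pvS a b f = pvS a m f + pvS m b f := by
  simp [pvS, PySem.List.pyRange_one_append a m b h1 h2]

theorem pvS_single (a : Int) (f : Int → Int) : pvS a (a + 1) f = f a := by
  simp [pvS, PySem.List.pyRange_one_cons (by omega : a < a + 1),
    PySem.List.pyRange_one_eq_nil (by omega : a + 1 ≤ a + 1)]

theorem pvS_congr {a b : Int} {f g : Int → Int}
    (h : ∀ d, a ≤ d → d < b → f d = g d) : pvS a b f = pvS a b g := by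
  unfold pvS
  congr 1
  exact List.map_congr_left (fun d hd => h d (PySem.List.mem_pyRange_one.1 hd).1
    (PySem.List.mem_pyRange_one.1 hd).2)

theorem pvFoldl_eq_S (a b : Int) (f : Int → Int) :
    (PySem.List.pyRange a b).foldl (fun res d => res + f d) 0 = pvS a b f := by
  simpa using PySem.List.foldl_add (PySem.List.pyRange a b) f 0

theorem pvDfsA_cons (st : PySem.Set Int) (l0 h0 i pre : Int) (lt ht : List Int)
    (bL bH : Bool) :
    pvDfsA st (l0 :: lt) (h0 :: ht) i pre bL bH =
      pvS (if PySem.Set.contains st i then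
             (if 0 < i then max (if bL then l0 else 0) pre else (if bL then l0 else 0))
           else (if bL then l0 else 0)) ((if bH then h0 else 9) + 1)
        (fun d => pvDfsA st lt ht (i + 1) (if PySem.Set.contains st i then d else pre)
            (bL && (d == (if bL then l0 else 0))) (bH && (d == (if bH then h0 else 9)))) := by
  rw [pvDfsA]
  exact pvFoldl_eq_S _ _ _

theorem pvDfsB_cons (st : PySem.Set Int) (d0 j pre : Int) (dt : List Int) (t : Bool) :
    pvDfsB st (d0 :: dt) j pre t =
      pvS (if PySem.Set.contains st j then max pre 0 else 0) ((if t then d0 else 9) + 1)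
        (fun d => pvDfsB st dt (j + 1) (if PySem.Set.contains st j then d else pre)
            (t && (d == (if t then d0 else 9)))) := by
  rw [pvDfsB]
  split
  · exact pvFoldl_eq_S _ _ _
  · exact pvFoldl_eq_S _ _ _

def pvDg (L : List Int) : Prop := ∀ d ∈ L, 0 ≤ d ∧ d ≤ 9

def pvSat (st : PySem.Set Int) : List Int → Int → Int → Bool
  | [], _, _ => true
  | l0 :: lt, i, pre =>
    if PySem.Set.contains st i then (decide (max pre 0 ≤ l0)) && pvSat st lt (i + 1) l0
    else pvSat st lt (i + 1) pre

def pvSatI (st : PySem.Set Int) (L : List Int) (i pre : Int) : Int :=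
  if pvSat st L i pre then 1 else 0

def pvLexLe : List Int → List Int → Prop
  | [], [] => True
  | l0 :: lt, h0 :: ht => l0 < h0 ∨ (l0 = h0 ∧ pvLexLe lt ht)
  | _, _ => False

def pvBorrow : List Int → List Int
  | [] => []
  | l0 :: lt =>
    if lt.all (· == 0) then (l0 - 1) :: List.replicate lt.length 9 else l0 :: pvBorrow lt




theorem pv_start_eq (i pre : Int) (hi : 0 ≤ i) (hp : i = 0 → pre = -1) :
    (if 0 < i then max 0 pre else 0) = max pre 0 := by
  rcases lt_or_eq_of_le hi with h | h
  · rw [if_pos h, max_comm]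
  · rw [if_neg (by omega), hp h.symm]
    rfl

theorem pv_free (st : PySem.Set Int) :
    ∀ (L H X : List Int) (i pre : Int), L.length = H.length → L.length = X.length →
      0 ≤ i → (i = 0 → pre = -1) →
      pvDfsA st L H i pre false false = pvDfsB st X i pre false := by
  intro L
  induction L with
  | nil =>
    intro H X i pre hLH hLX _ _
    cases H with
    | cons _ _ => simp at hLH
    | nil =>
      cases X with
      | cons _ _ => simp at hLX
      | nil => rfl
  | cons l0 lt ih =>
    intro H X i pre hLH hLX hi hp
    cases H with
    | nil => simp at hLH
    | cons h0 ht =>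
      cases X with
      | nil => simp at hLX
      | cons x0 xt =>
        simp only [List.length_cons] at hLH hLX
        rw [pvDfsA_cons, pvDfsB_cons]
        simp only [Bool.false_eq_true, if_false, Bool.false_and]
        by_cases hc : PySem.Set.contains st i = true
        · rw [if_pos hc, if_pos hc, pv_start_eq i pre hi hp]
          apply pvS_congr
          intro d _ _
          simp only [if_pos hc]
          exact ih ht xt (i + 1) d (by omega) (by omega) (by omega) (by omega)
        · rw [if_neg hc, if_neg hc]
          apply pvS_congr
          intro d _ _
          simp only [if_neg hc]
          exact ih ht xt (i + 1) pre (by omega) (by omega) (by omega) (by omega)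

theorem pv_freeB (st : PySem.Set Int) (X Y : List Int) (i pre : Int)
    (hlen : X.length = Y.length) (hi : 0 ≤ i) (hp : i = 0 → pre = -1) :
    pvDfsB st X i pre false = pvDfsB st Y i pre false := by
  rw [← pv_free st X X X i pre rfl rfl hi hp, pv_free st X X Y i pre rfl hlen hi hp]

theorem pv_ffTT (st : PySem.Set Int) :
    ∀ (L H : List Int) (i pre : Int), L.length = H.length →
      0 ≤ i → (i = 0 → pre = -1) →
      pvDfsA st L H i pre false true = pvDfsB st H i pre true := by
  intro L
  induction L with
  | nil =>
    intro H i pre hLH _ _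
    cases H with
    | cons _ _ => simp at hLH
    | nil => rfl
  | cons l0 lt ih =>
    intro H i pre hLH hi hp
    cases H with
    | nil => simp at hLH
    | cons h0 ht =>
      simp only [List.length_cons] at hLH
      rw [pvDfsA_cons, pvDfsB_cons]
      simp only [Bool.false_eq_true, if_false, if_true, Bool.false_and, Bool.true_and]
      by_cases hc : PySem.Set.contains st i = true
      · rw [if_pos hc, if_pos hc, pv_start_eq i pre hi hp]
        apply pvS_congr
        intro d _ _
        simp only [if_pos hc]
        by_cases hd : d = h0
        · simp only [hd, beq_self_eq_true]
          exact ih ht (i + 1) h0 (by omega) (by omega) (by omega)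
        · have : (d == h0) = false := by simp [hd]
          rw [this]
          exact pv_free st lt ht ht (i + 1) d (by omega) (by omega) (by omega) (by omega)
      · rw [if_neg hc, if_neg hc]
        apply pvS_congr
        intro d _ _
        simp only [if_neg hc]
        by_cases hd : d = h0
        · simp only [hd, beq_self_eq_true]
          exact ih ht (i + 1) pre (by omega) (by omega) (by omega)
        · have : (d == h0) = false := by simp [hd]
          rw [this]
          exact pv_free st lt ht ht (i + 1) pre (by omega) (by omega) (by omega) (by omega)

theorem pvSat_cons (st : PySem.Set Int) (l0 i pre : Int) (lt : List Int) :
    pvSat st (l0 :: lt) i pre =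
      if PySem.Set.contains st i then (decide (max pre 0 ≤ l0)) && pvSat st lt (i + 1) l0
      else pvSat st lt (i + 1) pre := rfl

theorem pvSatI_cons (st : PySem.Set Int) (l0 i pre : Int) (lt : List Int) :
    pvSatI st (l0 :: lt) i pre =
      if PySem.Set.contains st i then
        (if max pre 0 ≤ l0 then pvSatI st lt (i + 1) l0 else 0)
      else pvSatI st lt (i + 1) pre := by
  unfold pvSatI
  rw [pvSat_cons]
  by_cases hc : PySem.Set.contains st i = true
  · simp only [hc, if_true]
    by_cases hle : max pre 0 ≤ l0
    · simp [hle]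
    · simp [hle]
  · simp only [Bool.not_eq_true] at hc
    simp only [hc, Bool.false_eq_true, if_false]

theorem pv_zeros (st : PySem.Set Int) :
    ∀ (n : Nat) (i pre : Int),
      pvDfsB st (List.replicate n 0) i pre true = pvSatI st (List.replicate n 0) i pre := by
  intro n
  induction n with
  | zero => intro i pre; rfl
  | succ n ih =>
    intro i pre
    rw [List.replicate_succ, pvDfsB_cons, pvSatI_cons]
    by_cases hc : PySem.Set.contains st i = true
    · simp only [hc, if_true]
      by_cases hle : max pre 0 ≤ 0
      · rw [if_pos hle]
        have hm : max pre 0 = 0 := by omega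
        rw [hm, pvS_single 0]
        simpa using ih (i + 1) 0
      · rw [if_neg hle, pvS_empty (by omega)]
    · simp only [Bool.not_eq_true] at hc
      simp only [hc, Bool.false_eq_true, if_false, if_true]
      rw [pvS_single 0]
      simpa using ih (i + 1) pre


theorem pv_nines (st : PySem.Set Int) :
    ∀ (n : Nat) (i pre : Int), 0 ≤ i → (i = 0 → pre = -1) →
      pvDfsB st (List.replicate n 9) i pre true = pvDfsB st (List.replicate n 9) i pre false := by
  intro n
  induction n with
  | zero => intro i pre _ _; rfl
  | succ n ih =>
    intro i pre hi hp
    rw [List.replicate_succ, pvDfsB_cons, pvDfsB_cons]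
    simp only [if_true, Bool.false_eq_true, if_false, Bool.false_and, Bool.true_and]
    by_cases hc : PySem.Set.contains st i = true
    · rw [if_pos hc]
      apply pvS_congr
      intro d _ hdlt
      simp only [if_pos hc]
      by_cases hd : d = 9
      · simp only [hd, beq_self_eq_true]
        exact ih (i + 1) 9 (by omega) (by omega)
      · have : (d == 9) = false := by simp [hd]
        rw [this]
    · rw [if_neg hc]
      apply pvS_congr
      intro d _ hdlt
      simp only [if_neg hc]
      by_cases hd : d = 9
      · simp only [hd, beq_self_eq_true]
        exact ih (i + 1) pre (by omega) (by omega)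
      · have : (d == 9) = false := by simp [hd]
        rw [this]

theorem pvS_cons {a b : Int} (h : a < b) (f : Int → Int) :
    pvS a b f = f a + pvS (a + 1) b f := by
  unfold pvS
  rw [PySem.List.pyRange_one_cons h]
  simp

theorem pv_startA_eq (l0 i pre : Int) (hi : 0 ≤ i) (hp : i = 0 → pre = -1) (hl0 : 0 ≤ l0) :
    (if 0 < i then max l0 pre else l0) = max l0 pre := by
  rcases lt_or_eq_of_le hi with h | h
  · rw [if_pos h]
  · rw [if_neg (by omega), hp h.symm]
    omega

theorem pv_TTff (st : PySem.Set Int) :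
    ∀ (L H : List Int) (i pre : Int), L.length = H.length → pvDg L →
      0 ≤ i → (i = 0 → pre = -1) →
      pvDfsA st L H i pre true false =
        pvDfsB st L i pre false - pvDfsB st L i pre true + pvSatI st L i pre := by
  intro L
  induction L with
  | nil =>
    intro H i pre hLH _ _ _
    cases H with
    | cons _ _ => simp at hLH
    | nil => show (1:Int) = 1 - 1 + 1; ring
  | cons l0 lt ih =>
    intro H i pre hLH hdg hi hp
    cases H with
    | nil => simp at hLH
    | cons h0 ht =>
      simp only [List.length_cons] at hLH
      have hl0 := hdg l0 (by simp)
      have hdgt : pvDg lt := fun e he => hdg e (by simp [he])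
      rw [pvDfsA_cons, pvDfsB_cons, pvDfsB_cons, pvSatI_cons]
      simp only [if_true, Bool.false_eq_true, if_false, Bool.true_and, Bool.false_and,
        show (9:Int) + 1 = 10 from by norm_num]
      by_cases hc : PySem.Set.contains st i = true
      · simp only [hc, if_true]
        rw [pv_startA_eq l0 i pre hi hp hl0.1]
        by_cases hple : pre ≤ l0
        · have hs : max l0 pre = l0 := by omega
          have hs1 : max pre 0 ≤ l0 := by omega
          rw [hs, if_pos hs1]
          rw [pvS_cons (show l0 < 10 by omega)]
          rw [pvS_split (show max pre 0 ≤ l0 by omega) (show l0 ≤ 10 by omega)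
            (fun d => pvDfsB st lt (i + 1) d false)]
          rw [pvS_split (show max pre 0 ≤ l0 by omega) (show l0 ≤ l0 + 1 by omega)
            (fun d => pvDfsB st lt (i + 1) d (d == l0))]
          rw [pvS_cons (show l0 < 10 by omega) (fun d => pvDfsB st lt (i + 1) d false)]
          rw [pvS_single l0 (fun d => pvDfsB st lt (i + 1) d (d == l0))]
          have e1 : pvS (l0 + 1) 10 (fun d => pvDfsA st lt ht (i + 1) d (d == l0) false) =
              pvS (l0 + 1) 10 (fun d => pvDfsB st lt (i + 1) d false) := by
            apply pvS_congr
            intro d hd1 hd2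
            have : (d == l0) = false := by simp; omega
            rw [this]
            exact pv_free st lt ht lt (i + 1) d (by omega) rfl (by omega) (by omega)
          have e2 : pvS (max pre 0) l0 (fun d => pvDfsB st lt (i + 1) d (d == l0)) =
              pvS (max pre 0) l0 (fun d => pvDfsB st lt (i + 1) d false) := by
            apply pvS_congr
            intro d hd1 hd2
            have : (d == l0) = false := by simp; omega
            rw [this]
          have e3 : ((l0 : Int) == l0) = true := by simp
          rw [e1, e2, e3]
          rw [ih ht (i + 1) l0 (by omega) hdgt (by omega) (by omega)]
          ring
        · have hs : max l0 pre = pre := by omega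
          have hs1 : max pre 0 = pre := by omega
          rw [hs, hs1, if_neg (by omega)]
          rw [pvS_empty (show l0 + 1 ≤ pre by omega)]
          have e1 : pvS pre 10 (fun d => pvDfsA st lt ht (i + 1) d (d == l0) false) =
              pvS pre 10 (fun d => pvDfsB st lt (i + 1) d false) := by
            apply pvS_congr
            intro d hd1 hd2
            have : (d == l0) = false := by simp; omega
            rw [this]
            exact pv_free st lt ht lt (i + 1) d (by omega) rfl (by omega) (by omega)
          rw [e1]
          ring
      · simp only [Bool.not_eq_true] at hc
        simp only [hc, Bool.false_eq_true, if_false]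
        rw [pvS_cons (show l0 < 10 by omega)]
        rw [pvS_split (show (0:Int) ≤ l0 by omega) (show l0 ≤ 10 by omega)
          (fun _ => pvDfsB st lt (i + 1) pre false)]
        rw [pvS_split (show (0:Int) ≤ l0 by omega) (show l0 ≤ l0 + 1 by omega)
          (fun d => pvDfsB st lt (i + 1) pre (d == l0))]
        rw [pvS_cons (show l0 < 10 by omega) (fun _ => pvDfsB st lt (i + 1) pre false)]
        rw [pvS_single l0 (fun d => pvDfsB st lt (i + 1) pre (d == l0))]
        have e1 : pvS (l0 + 1) 10 (fun d => pvDfsA st lt ht (i + 1) pre (d == l0) false) =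
            pvS (l0 + 1) 10 (fun _ => pvDfsB st lt (i + 1) pre false) := by
          apply pvS_congr
          intro d hd1 hd2
          have : (d == l0) = false := by simp; omega
          rw [this]
          exact pv_free st lt ht lt (i + 1) pre (by omega) rfl (by omega) (by omega)
        have e2 : pvS 0 l0 (fun d => pvDfsB st lt (i + 1) pre (d == l0)) =
            pvS 0 l0 (fun _ => pvDfsB st lt (i + 1) pre false) := by
          apply pvS_congr
          intro d hd1 hd2
          have : (d == l0) = false := by simp; omega
          rw [this]
        have e3 : ((l0 : Int) == l0) = true := by simp
        rw [e1, e2, e3]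
        rw [ih ht (i + 1) pre (by omega) hdgt (by omega) (by omega)]
        ring

theorem pv_main_gt (st : PySem.Set Int) :
    ∀ (L H : List Int) (i pre : Int), L.length = H.length → pvDg L → pvDg H →
      ¬ pvLexLe L H → 0 ≤ i → (i = 0 → pre = -1) →
      pvDfsA st L H i pre true true = 0 := by
  intro L
  induction L with
  | nil =>
    intro H i pre hLH _ _ hnl _ _
    cases H with
    | cons _ _ => simp at hLH
    | nil => exact absurd trivial hnl
  | cons l0 lt ih =>
    intro H i pre hLH hdgL hdgH hnl hi hp
    cases H with
    | nil => simp at hLH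
    | cons h0 ht =>
      simp only [List.length_cons] at hLH
      have hl0 := hdgL l0 (by simp)
      have hh0 := hdgH h0 (by simp)
      unfold pvLexLe at hnl
      rw [pvDfsA_cons]
      simp only [if_true, Bool.true_and]
      by_cases hc : PySem.Set.contains st i = true
      · simp only [hc, if_true]
        rw [pv_startA_eq l0 i pre hi hp hl0.1]
        rcases lt_trichotomy l0 h0 with hlh | hlh | hlh
        · exact absurd (Or.inl hlh) hnl
        · subst hlh
          by_cases hple : pre ≤ l0
          · rw [show max l0 pre = l0 by omega, pvS_single l0]
            simp only [beq_self_eq_true]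
            exact ih ht (i + 1) l0 (by omega) (fun e he => hdgL e (by simp [he]))
              (fun e he => hdgH e (by simp [he])) (fun hx => hnl (Or.inr ⟨rfl, hx⟩))
              (by omega) (by omega)
          · rw [show max l0 pre = pre by omega, pvS_empty (by omega)]
        · exact pvS_empty (by omega) _
      · simp only [Bool.not_eq_true] at hc
        simp only [hc, Bool.false_eq_true, if_false]
        rcases lt_trichotomy l0 h0 with hlh | hlh | hlh
        · exact absurd (Or.inl hlh) hnl
        · subst hlh
          rw [pvS_single l0]
          simp only [beq_self_eq_true]
          exact ih ht (i + 1) pre (by omega) (fun e he => hdgL e (by simp [he]))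
            (fun e he => hdgH e (by simp [he])) (fun hx => hnl (Or.inr ⟨rfl, hx⟩))
            (by omega) (by omega)
        · exact pvS_empty (by omega) _

theorem pv_main (st : PySem.Set Int) :
    ∀ (L H : List Int) (i pre : Int), L.length = H.length → pvDg L → pvDg H →
      pvLexLe L H → 0 ≤ i → (i = 0 → pre = -1) →
      pvDfsA st L H i pre true true =
        pvDfsB st H i pre true - pvDfsB st L i pre true + pvSatI st L i pre := by
  intro L
  induction L with
  | nil =>
    intro H i pre hLH _ _ _ _ _
    cases H with
    | cons _ _ => simp at hLH
    | nil => show (1:Int) = 1 - 1 + 1; ring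
  | cons l0 lt ih =>
    intro H i pre hLH hdgL hdgH hlex hi hp
    cases H with
    | nil => simp at hLH
    | cons h0 ht =>
      simp only [List.length_cons] at hLH
      have hl0 := hdgL l0 (by simp)
      have hh0 := hdgH h0 (by simp)
      have hdgl : pvDg lt := fun e he => hdgL e (by simp [he])
      have hdgh : pvDg ht := fun e he => hdgH e (by simp [he])
      unfold pvLexLe at hlex
      rw [pvDfsA_cons, pvDfsB_cons, pvDfsB_cons, pvSatI_cons]
      simp only [if_true, Bool.true_and]
      by_cases hc : PySem.Set.contains st i = true
      · simp only [hc, if_true]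
        rw [pv_startA_eq l0 i pre hi hp hl0.1]
        rcases hlex with hlh | ⟨hlh, htl⟩
        · -- l0 < h0
          by_cases hp1 : pre ≤ l0
          · -- startA = l0, sB = max pre 0 ≤ l0
            rw [show max l0 pre = l0 by omega]
            rw [if_pos (show max pre 0 ≤ l0 by omega)]
            rw [pvS_cons (show l0 < h0 + 1 by omega)]
            rw [pvS_split (show max pre 0 ≤ l0 by omega) (show l0 ≤ h0 + 1 by omega)
              (fun d => pvDfsB st ht (i + 1) d (d == h0))]
            rw [pvS_split (show (l0:Int) ≤ h0 by omega) (show h0 ≤ h0 + 1 by omega)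
              (fun d => pvDfsB st ht (i + 1) d (d == h0))]
            rw [pvS_single h0 (fun d => pvDfsB st ht (i + 1) d (d == h0))]
            rw [pvS_split (show max pre 0 ≤ l0 by omega) (show l0 ≤ l0 + 1 by omega)
              (fun d => pvDfsB st lt (i + 1) d (d == l0))]
            rw [pvS_single l0 (fun d => pvDfsB st lt (i + 1) d (d == l0))]
            -- LHS pieces
            have eA : pvS (l0 + 1) (h0 + 1)
                (fun d => pvDfsA st lt ht (i + 1) d (d == l0) (d == h0)) =
                pvS (l0 + 1) h0 (fun d => pvDfsB st ht (i + 1) d false) +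
                  pvDfsB st ht (i + 1) h0 true := by
              rw [pvS_split (show l0 + 1 ≤ h0 by omega) (show (h0:Int) ≤ h0 + 1 by omega)]
              rw [pvS_single h0 (fun d => pvDfsA st lt ht (i + 1) d (d == l0) (d == h0))]
              congr 1
              · apply pvS_congr
                intro d hd1 hd2
                have e1 : (d == l0) = false := by simp; omega
                have e2 : (d == h0) = false := by simp; omega
                rw [e1, e2]
                exact pv_free st lt ht ht (i + 1) d (by omega) (by omega) (by omega) (by omega)
              · have e1 : (h0 == l0) = false := by simp; omega
                have e2 : (h0 == h0) = true := by simp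
                rw [e1, e2]
                exact pv_ffTT st lt ht (i + 1) h0 (by omega) (by omega) (by omega)
            have e1 : ((l0:Int) == l0) = true := by simp
            have e2 : ((l0:Int) == h0) = false := by simp; omega
            rw [eA, e1, e2]
            rw [pv_TTff st lt ht (i + 1) l0 (by omega) hdgl (by omega) (by omega)]
            -- remaining frees on the RHS ranges below l0 / between l0 and h0
            have eH1 : pvS (max pre 0) l0 (fun d => pvDfsB st ht (i + 1) d (d == h0)) =
                pvS (max pre 0) l0 (fun d => pvDfsB st ht (i + 1) d false) := by
              apply pvS_congr; intro d hd1 hd2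
              have : (d == h0) = false := by simp; omega
              rw [this]
            have eH2 : pvS l0 h0 (fun d => pvDfsB st ht (i + 1) d (d == h0)) =
                pvS l0 h0 (fun d => pvDfsB st ht (i + 1) d false) := by
              apply pvS_congr; intro d hd1 hd2
              have : (d == h0) = false := by simp; omega
              rw [this]
            have eL1 : pvS (max pre 0) l0 (fun d => pvDfsB st lt (i + 1) d (d == l0)) =
                pvS (max pre 0) l0 (fun d => pvDfsB st ht (i + 1) d false) := by
              apply pvS_congr; intro d hd1 hd2
              have : (d == l0) = false := by simp; omega
              rw [this]
              exact pv_freeB st lt ht (i + 1) d (by omega) (by omega) (by omega)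
            have e4 : ((h0:Int) == h0) = true := by simp
            rw [eH1, eH2, eL1, e4]
            rw [pvS_split (show (l0:Int) ≤ l0 + 1 by omega) (show l0 + 1 ≤ h0 by omega)
              (fun d => pvDfsB st ht (i + 1) d false)]
            rw [pvS_single l0 (fun d => pvDfsB st ht (i + 1) d false)]
            rw [pv_freeB st lt ht (i + 1) l0 (by omega) (by omega) (by omega)]
            ring
          · -- pre > l0
            rw [show max l0 pre = pre by omega, show max pre 0 = pre by omega]
            rw [if_neg (by omega)]
            rw [pvS_empty (show l0 + 1 ≤ pre by omega)]
            by_cases hp2 : pre ≤ h0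
            · rw [pvS_split (show (pre:Int) ≤ h0 by omega) (show (h0:Int) ≤ h0 + 1 by omega)
                (fun d => pvDfsA st lt ht (i + 1) d (d == l0) (d == h0))]
              rw [pvS_single h0 (fun d => pvDfsA st lt ht (i + 1) d (d == l0) (d == h0))]
              rw [pvS_split (show (pre:Int) ≤ h0 by omega) (show (h0:Int) ≤ h0 + 1 by omega)
                (fun d => pvDfsB st ht (i + 1) d (d == h0))]
              rw [pvS_single h0 (fun d => pvDfsB st ht (i + 1) d (d == h0))]
              have eA : pvS pre h0 (fun d => pvDfsA st lt ht (i + 1) d (d == l0) (d == h0)) =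
                  pvS pre h0 (fun d => pvDfsB st ht (i + 1) d (d == h0)) := by
                apply pvS_congr; intro d hd1 hd2
                have e1 : (d == l0) = false := by simp; omega
                have e2 : (d == h0) = false := by simp; omega
                rw [e1, e2]
                exact pv_free st lt ht ht (i + 1) d (by omega) (by omega) (by omega) (by omega)
              have e1 : ((h0:Int) == l0) = false := by simp; omega
              have e2 : ((h0:Int) == h0) = true := by simp
              rw [eA, e1, e2]
              rw [pv_ffTT st lt ht (i + 1) h0 (by omega) (by omega) (by omega)]
              ring
            · rw [pvS_empty (show h0 + 1 ≤ pre by omega),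
                pvS_empty (show h0 + 1 ≤ pre by omega)]
              ring
        · -- l0 = h0
          subst hlh
          by_cases hp1 : pre ≤ l0
          · rw [show max l0 pre = l0 by omega]
            rw [if_pos (show max pre 0 ≤ l0 by omega)]
            rw [pvS_single l0]
            simp only [beq_self_eq_true]
            rw [pvS_split (show max pre 0 ≤ l0 by omega) (show (l0:Int) ≤ l0 + 1 by omega)
              (fun d => pvDfsB st ht (i + 1) d (d == l0))]
            rw [pvS_single l0 (fun d => pvDfsB st ht (i + 1) d (d == l0))]
            rw [pvS_split (show max pre 0 ≤ l0 by omega) (show (l0:Int) ≤ l0 + 1 by omega)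
              (fun d => pvDfsB st lt (i + 1) d (d == l0))]
            rw [pvS_single l0 (fun d => pvDfsB st lt (i + 1) d (d == l0))]
            have eH : pvS (max pre 0) l0 (fun d => pvDfsB st ht (i + 1) d (d == l0)) =
                pvS (max pre 0) l0 (fun d => pvDfsB st ht (i + 1) d false) := by
              apply pvS_congr; intro d hd1 hd2
              have : (d == l0) = false := by simp; omega
              rw [this]
            have eL : pvS (max pre 0) l0 (fun d => pvDfsB st lt (i + 1) d (d == l0)) =
                pvS (max pre 0) l0 (fun d => pvDfsB st ht (i + 1) d false) := by
              apply pvS_congr; intro d hd1 hd2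
              have : (d == l0) = false := by simp; omega
              rw [this]
              exact pv_freeB st lt ht (i + 1) d (by omega) (by omega) (by omega)
            have e0 : ((l0:Int) == l0) = true := by simp
            rw [eH, eL, e0]
            rw [ih ht (i + 1) l0 (by omega) hdgl hdgh htl (by omega) (by omega)]
            ring
          · rw [show max l0 pre = pre by omega, show max pre 0 = pre by omega]
            rw [if_neg (by omega)]
            rw [pvS_empty (show l0 + 1 ≤ pre by omega), pvS_empty (show l0 + 1 ≤ pre by omega),
              pvS_empty (show l0 + 1 ≤ pre by omega)]
            ring
      · simp only [Bool.not_eq_true] at hc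
        simp only [hc, Bool.false_eq_true, if_false]
        rcases hlex with hlh | ⟨hlh, htl⟩
        · -- l0 < h0, unflagged
          rw [pvS_cons (show l0 < h0 + 1 by omega)]
          have eA : pvS (l0 + 1) (h0 + 1)
              (fun d => pvDfsA st lt ht (i + 1) pre (d == l0) (d == h0)) =
              pvS (l0 + 1) h0 (fun _ => pvDfsB st ht (i + 1) pre false) +
                pvDfsB st ht (i + 1) pre true := by
            rw [pvS_split (show l0 + 1 ≤ h0 by omega) (show (h0:Int) ≤ h0 + 1 by omega)]
            rw [pvS_single h0 (fun d => pvDfsA st lt ht (i + 1) pre (d == l0) (d == h0))]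
            congr 1
            · apply pvS_congr
              intro d hd1 hd2
              have e1 : (d == l0) = false := by simp; omega
              have e2 : (d == h0) = false := by simp; omega
              rw [e1, e2]
              exact pv_free st lt ht ht (i + 1) pre (by omega) (by omega) (by omega) (by omega)
            · have e1 : (h0 == l0) = false := by simp; omega
              have e2 : (h0 == h0) = true := by simp
              rw [e1, e2]
              exact pv_ffTT st lt ht (i + 1) pre (by omega) (by omega) (by omega)
          have e1 : ((l0:Int) == l0) = true := by simp
          have e2 : ((l0:Int) == h0) = false := by simp; omega
          rw [eA, e1, e2]
          rw [pv_TTff st lt ht (i + 1) pre (by omega) hdgl (by omega) (by omega)]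
          rw [pvS_split (show (0:Int) ≤ l0 by omega) (show (l0:Int) ≤ h0 + 1 by omega)
            (fun d => pvDfsB st ht (i + 1) pre (d == h0))]
          rw [pvS_split (show (l0:Int) ≤ h0 by omega) (show (h0:Int) ≤ h0 + 1 by omega)
            (fun d => pvDfsB st ht (i + 1) pre (d == h0))]
          rw [pvS_single h0 (fun d => pvDfsB st ht (i + 1) pre (d == h0))]
          rw [pvS_split (show (0:Int) ≤ l0 by omega) (show (l0:Int) ≤ l0 + 1 by omega)
            (fun d => pvDfsB st lt (i + 1) pre (d == l0))]
          rw [pvS_single l0 (fun d => pvDfsB st lt (i + 1) pre (d == l0))]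
          have eH1 : pvS 0 l0 (fun d => pvDfsB st ht (i + 1) pre (d == h0)) =
              pvS 0 l0 (fun _ => pvDfsB st ht (i + 1) pre false) := by
            apply pvS_congr; intro d hd1 hd2
            have : (d == h0) = false := by simp; omega
            rw [this]
          have eH2 : pvS l0 h0 (fun d => pvDfsB st ht (i + 1) pre (d == h0)) =
              pvS l0 h0 (fun _ => pvDfsB st ht (i + 1) pre false) := by
            apply pvS_congr; intro d hd1 hd2
            have : (d == h0) = false := by simp; omega
            rw [this]
          have eL1 : pvS 0 l0 (fun d => pvDfsB st lt (i + 1) pre (d == l0)) =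
              pvS 0 l0 (fun _ => pvDfsB st ht (i + 1) pre false) := by
            apply pvS_congr; intro d hd1 hd2
            have : (d == l0) = false := by simp; omega
            rw [this]
            exact pv_freeB st lt ht (i + 1) pre (by omega) (by omega) (by omega)
          have e3 : ((h0:Int) == h0) = true := by simp
          rw [eH1, eH2, eL1, e3]
          rw [pv_freeB st lt ht (i + 1) pre (by omega) (by omega) (by omega)]
          rw [pvS_split (show (l0:Int) ≤ l0 + 1 by omega) (show l0 + 1 ≤ h0 by omega)
            (fun _ => pvDfsB st ht (i + 1) pre false)]
          rw [pvS_single l0 (fun _ => pvDfsB st ht (i + 1) pre false)]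
          rw [e1]
          ring
        · -- l0 = h0, unflagged
          subst hlh
          rw [pvS_single l0]
          simp only [beq_self_eq_true]
          rw [pvS_split (show (0:Int) ≤ l0 by omega) (show (l0:Int) ≤ l0 + 1 by omega)
            (fun d => pvDfsB st ht (i + 1) pre (d == l0))]
          rw [pvS_single l0 (fun d => pvDfsB st ht (i + 1) pre (d == l0))]
          rw [pvS_split (show (0:Int) ≤ l0 by omega) (show (l0:Int) ≤ l0 + 1 by omega)
            (fun d => pvDfsB st lt (i + 1) pre (d == l0))]
          rw [pvS_single l0 (fun d => pvDfsB st lt (i + 1) pre (d == l0))]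
          have eH : pvS 0 l0 (fun d => pvDfsB st ht (i + 1) pre (d == l0)) =
              pvS 0 l0 (fun _ => pvDfsB st ht (i + 1) pre false) := by
            apply pvS_congr; intro d hd1 hd2
            have : (d == l0) = false := by simp; omega
            rw [this]
          have eL : pvS 0 l0 (fun d => pvDfsB st lt (i + 1) pre (d == l0)) =
              pvS 0 l0 (fun _ => pvDfsB st ht (i + 1) pre false) := by
            apply pvS_congr; intro d hd1 hd2
            have : (d == l0) = false := by simp; omega
            rw [this]
            exact pv_freeB st lt ht (i + 1) pre (by omega) (by omega) (by omega)
          have e0 : ((l0:Int) == l0) = true := by simp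
          rw [eH, eL, e0]
          rw [ih ht (i + 1) pre (by omega) hdgl hdgh htl (by omega) (by omega)]
          ring

theorem pvBorrow_len : ∀ (L : List Int), (pvBorrow L).length = L.length := by
  intro L
  induction L with
  | nil => rfl
  | cons l0 lt ih =>
    rw [pvBorrow]
    split
    · simp
    · simp [ih]

theorem pv_borrow (st : PySem.Set Int) :
    ∀ (L : List Int) (i pre : Int), pvDg L → ¬ (L.all (· == 0) = true) →
      0 ≤ i → (i = 0 → pre = -1) →
      pvDfsB st (pvBorrow L) i pre true = pvDfsB st L i pre true - pvSatI st L i pre := by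
  intro L
  induction L with
  | nil => intro i pre _ h _ _; simp at h
  | cons l0 lt ih =>
    intro i pre hdg hnz hi hp
    have hl0 := hdg l0 (by simp)
    have hdgt : pvDg lt := fun e he => hdg e (by simp [he])
    rw [pvBorrow]
    by_cases hz : lt.all (· == 0) = true
    · -- tail is all zeros, decrement the head and fill with 9s
      rw [if_pos hz]
      have hl0' : l0 ≠ 0 := by intro h; exact hnz (by subst h; simp [hz])
      have hrep : lt = List.replicate lt.length 0 := by
        apply List.eq_replicate_of_mem
        intro b hb
        simpa using (List.all_eq_true.1 hz) b hb
      rw [pvDfsB_cons, pvDfsB_cons, pvSatI_cons]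
      simp only [if_true]
      have eL : ∀ s : Int, pvS s ((l0 - 1) + 1)
          (fun d => pvDfsB st (List.replicate lt.length 9) (i + 1)
            (if PySem.Set.contains st i = true then d else pre) (true && (d == l0 - 1))) =
          pvS s l0 (fun d => pvDfsB st lt (i + 1)
            (if PySem.Set.contains st i = true then d else pre) false) := by
        intro s
        rw [show (l0 - 1) + 1 = l0 by ring]
        apply pvS_congr
        intro d hd1 hd2
        by_cases hd : d = l0 - 1
        · have e1 : (true && (d == l0 - 1)) = true := by simp [hd]
          rw [e1]
          rw [pv_nines st lt.length (i + 1) _ (by omega) (by omega)]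
          exact pv_freeB st _ lt (i + 1) _ (by simp) (by omega) (by omega)
        · have e1 : (true && (d == l0 - 1)) = false := by simp [hd]
          rw [e1]
          exact pv_freeB st _ lt (i + 1) _ (by simp) (by omega) (by omega)
      by_cases hc : PySem.Set.contains st i = true
      · simp only [hc, if_true] at eL ⊢
        rw [eL]
        by_cases hs : max pre 0 ≤ l0
        · rw [if_pos hs]
          rw [pvS_split (show max pre 0 ≤ l0 by omega) (show (l0:Int) ≤ l0 + 1 by omega)
            (fun d => pvDfsB st lt (i + 1) d (true && (d == l0)))]
          rw [pvS_single l0 (fun d => pvDfsB st lt (i + 1) d (true && (d == l0)))]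
          have e2 : (true && ((l0:Int) == l0)) = true := by simp
          rw [e2]
          have e3 : pvS (max pre 0) l0 (fun d => pvDfsB st lt (i + 1) d (true && (d == l0))) =
              pvS (max pre 0) l0 (fun d => pvDfsB st lt (i + 1) d false) := by
            apply pvS_congr
            intro d hd1 hd2
            have : (true && (d == l0)) = false := by simp; omega
            rw [this]
          rw [e3]
          -- tight on the all-zero tail = its satisfaction indicator
          rw [hrep, pv_zeros st lt.length (i + 1) l0]
          ring
        · rw [if_neg hs]
          rw [pvS_empty (show l0 + 1 ≤ max pre 0 by omega)]
          rw [pvS_empty (show (l0:Int) ≤ max pre 0 by omega)]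
          ring
      · simp only [Bool.not_eq_true] at hc
        simp only [hc, Bool.false_eq_true, if_false] at eL ⊢
        rw [eL]
        rw [pvS_split (show (0:Int) ≤ l0 by omega) (show (l0:Int) ≤ l0 + 1 by omega)
          (fun d => pvDfsB st lt (i + 1) pre (true && (d == l0)))]
        rw [pvS_single l0 (fun d => pvDfsB st lt (i + 1) pre (true && (d == l0)))]
        have e2 : (true && ((l0:Int) == l0)) = true := by simp
        rw [e2]
        have e3 : pvS 0 l0 (fun d => pvDfsB st lt (i + 1) pre (true && (d == l0))) =
            pvS 0 l0 (fun d => pvDfsB st lt (i + 1) pre false) := by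
          apply pvS_congr
          intro d hd1 hd2
          have : (true && (d == l0)) = false := by simp; omega
          rw [this]
        rw [e3]
        rw [hrep, pv_zeros st lt.length (i + 1) pre]
        ring
    · -- borrow in the tail
      rw [if_neg hz]
      rw [pvDfsB_cons, pvDfsB_cons, pvSatI_cons]
      simp only [if_true]
      by_cases hc : PySem.Set.contains st i = true
      · simp only [hc, if_true]
        by_cases hs : max pre 0 ≤ l0
        · rw [if_pos hs]
          rw [pvS_split (show max pre 0 ≤ l0 by omega) (show (l0:Int) ≤ l0 + 1 by omega)
            (fun d => pvDfsB st (pvBorrow lt) (i + 1) d (true && (d == l0)))]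
          rw [pvS_single l0 (fun d => pvDfsB st (pvBorrow lt) (i + 1) d (true && (d == l0)))]
          rw [pvS_split (show max pre 0 ≤ l0 by omega) (show (l0:Int) ≤ l0 + 1 by omega)
            (fun d => pvDfsB st lt (i + 1) d (true && (d == l0)))]
          rw [pvS_single l0 (fun d => pvDfsB st lt (i + 1) d (true && (d == l0)))]
          have e2 : (true && ((l0:Int) == l0)) = true := by simp
          rw [e2]
          have e3 : pvS (max pre 0) l0
              (fun d => pvDfsB st (pvBorrow lt) (i + 1) d (true && (d == l0))) =
              pvS (max pre 0) l0 (fun d => pvDfsB st lt (i + 1) d (true && (d == l0))) := by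
            apply pvS_congr
            intro d hd1 hd2
            have e4 : (true && (d == l0)) = false := by simp; omega
            rw [e4]
            exact pv_freeB st _ lt (i + 1) _ (pvBorrow_len lt) (by omega) (by omega)
          rw [e3]
          rw [ih (i + 1) l0 hdgt (by simpa using hz) (by omega) (by omega)]
          ring
        · rw [if_neg hs]
          rw [pvS_empty (show l0 + 1 ≤ max pre 0 by omega),
            pvS_empty (show l0 + 1 ≤ max pre 0 by omega)]
          ring
      · simp only [Bool.not_eq_true] at hc
        simp only [hc, Bool.false_eq_true, if_false]
        rw [pvS_split (show (0:Int) ≤ l0 by omega) (show (l0:Int) ≤ l0 + 1 by omega)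
          (fun d => pvDfsB st (pvBorrow lt) (i + 1) pre (true && (d == l0)))]
        rw [pvS_single l0 (fun d => pvDfsB st (pvBorrow lt) (i + 1) pre (true && (d == l0)))]
        rw [pvS_split (show (0:Int) ≤ l0 by omega) (show (l0:Int) ≤ l0 + 1 by omega)
          (fun d => pvDfsB st lt (i + 1) pre (true && (d == l0)))]
        rw [pvS_single l0 (fun d => pvDfsB st lt (i + 1) pre (true && (d == l0)))]
        have e2 : (true && ((l0:Int) == l0)) = true := by simp
        rw [e2]
        have e3 : pvS 0 l0
            (fun d => pvDfsB st (pvBorrow lt) (i + 1) pre (true && (d == l0))) =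
            pvS 0 l0 (fun d => pvDfsB st lt (i + 1) pre (true && (d == l0))) := by
          apply pvS_congr
          intro d hd1 hd2
          have e4 : (true && (d == l0)) = false := by simp; omega
          rw [e4]
          exact pv_freeB st _ lt (i + 1) pre (pvBorrow_len lt) (by omega) (by omega)
        rw [e3]
        rw [ih (i + 1) pre hdgt (by simpa using hz) (by omega) (by omega)]
        ring

def pvVal (L : List Int) : Int := L.foldl (fun a d => 10 * a + d) 0

theorem pvVal_aux (L : List Int) : ∀ a : Int,
    L.foldl (fun a d => 10 * a + d) a = a * 10 ^ L.length + pvVal L := by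
  induction L with
  | nil => intro a; simp [pvVal]
  | cons d L ih =>
    intro a
    show L.foldl _ (10 * a + d) = _
    rw [ih (10 * a + d)]
    have : pvVal (d :: L) = (10 * 0 + d) * 10 ^ L.length + pvVal L := by
      show L.foldl _ (10 * 0 + d) = _; rw [ih (10 * 0 + d)]
    rw [this]; simp [List.length_cons]; ring

theorem pvVal_cons (l0 : Int) (lt : List Int) :
    pvVal (l0 :: lt) = l0 * 10 ^ lt.length + pvVal lt := by
  show lt.foldl _ (10 * 0 + l0) = _
  rw [pvVal_aux lt (10 * 0 + l0)]; ring

theorem pvVal_bounds : ∀ (L : List Int), pvDg L → 0 ≤ pvVal L ∧ pvVal L < 10 ^ L.length := by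
  intro L
  induction L with
  | nil => intro _; simp [pvVal]
  | cons l0 lt ih =>
    intro hdg
    have h0 := hdg l0 (by simp)
    have ht := ih (fun d hd => hdg d (by simp [hd]))
    have hp : (0:Int) < 10 ^ lt.length := by positivity
    rw [pvVal_cons]
    constructor
    · nlinarith [h0.1, ht.1]
    · have : l0 * 10 ^ lt.length + pvVal lt < (l0 + 1) * 10 ^ lt.length := by nlinarith
      have h2 : (l0 + 1) * 10 ^ lt.length ≤ 10 * 10 ^ lt.length := by nlinarith
      calc l0 * 10 ^ lt.length + pvVal lt < (l0 + 1) * 10 ^ lt.length := this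
        _ ≤ 10 * 10 ^ lt.length := h2
        _ = 10 ^ (l0 :: lt).length := by rw [List.length_cons]; ring

theorem pvVal_uniq : ∀ (L H : List Int), L.length = H.length → pvDg L → pvDg H →
    pvVal L = pvVal H → L = H := by
  intro L
  induction L with
  | nil => intro H hlen _ _ _; cases H with
    | nil => rfl
    | cons _ _ => simp at hlen
  | cons l0 lt ih =>
    intro H hlen hL hH hv
    cases H with
    | nil => simp at hlen
    | cons h0 ht =>
      simp only [List.length_cons] at hlen
      have hlen' : lt.length = ht.length := by omega
      have bl := pvVal_bounds lt (fun d hd => hL d (by simp [hd]))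
      have bh := pvVal_bounds ht (fun d hd => hH d (by simp [hd]))
      rw [pvVal_cons, pvVal_cons, hlen'] at hv
      have hl0 := hL l0 (by simp)
      have hh0 := hH h0 (by simp)
      have hp : (0:Int) < 10 ^ lt.length := by positivity
      rw [hlen'] at bl
      rw [hlen'] at hp
      have heads : l0 = h0 := by
        rcases lt_trichotomy l0 h0 with h | h | h
        · exfalso
          have : (l0 + 1) * 10 ^ ht.length ≤ h0 * 10 ^ ht.length := by
            apply mul_le_mul_of_nonneg_right (by omega) (by positivity)
          nlinarith [bl.1, bl.2, bh.1, bh.2]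
        · exact h
        · exfalso
          have : (h0 + 1) * 10 ^ ht.length ≤ l0 * 10 ^ ht.length := by
            apply mul_le_mul_of_nonneg_right (by omega) (by positivity)
          nlinarith [bl.1, bl.2, bh.1, bh.2]
      subst heads
      have : pvVal lt = pvVal ht := by linarith
      rw [ih ht hlen' (fun d hd => hL d (by simp [hd])) (fun d hd => hH d (by simp [hd])) this]

theorem pv_lex_of_not_lt : ∀ (L H : List Int), L.length = H.length → pvDg L → pvDg H →
    ¬ pvLexLe L H → pvVal H < pvVal L := by
  intro L
  induction L with
  | nil => intro H hlen _ _ hnl; cases H with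
    | nil => exact absurd trivial hnl
    | cons _ _ => simp at hlen
  | cons l0 lt ih =>
    intro H hlen hL hH hnl
    cases H with
    | nil => simp at hlen
    | cons h0 ht =>
      simp only [List.length_cons] at hlen
      have hlen' : lt.length = ht.length := by omega
      have bl := pvVal_bounds lt (fun d hd => hL d (by simp [hd]))
      have bh := pvVal_bounds ht (fun d hd => hH d (by simp [hd]))
      have hl0 := hL l0 (by simp)
      have hh0 := hH h0 (by simp)
      rw [pvVal_cons, pvVal_cons, hlen']
      unfold pvLexLe at hnl
      rw [hlen'] at bl
      rcases lt_trichotomy l0 h0 with h | h | h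
      · exact absurd (Or.inl h) hnl
      · have htl := ih ht hlen' (fun d hd => hL d (by simp [hd])) (fun d hd => hH d (by simp [hd]))
          (fun hlx => hnl (Or.inr ⟨h, hlx⟩))
        subst h; omega
      · have : (h0 + 1) * 10 ^ ht.length ≤ l0 * 10 ^ ht.length := by
          apply mul_le_mul_of_nonneg_right (by omega) (by positivity)
        nlinarith [bl.1, bl.2, bh.1, bh.2]

theorem pv_le_of_lex : ∀ (L H : List Int), L.length = H.length → pvDg L → pvDg H →
    pvLexLe L H → pvVal L ≤ pvVal H := by
  intro L
  induction L with
  | nil => intro H hlen _ _ _; cases H with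
    | nil => exact le_refl _
    | cons _ _ => simp at hlen
  | cons l0 lt ih =>
    intro H hlen hL hH hle
    cases H with
    | nil => simp at hlen
    | cons h0 ht =>
      simp only [List.length_cons] at hlen
      have hlen' : lt.length = ht.length := by omega
      have bl := pvVal_bounds lt (fun d hd => hL d (by simp [hd]))
      have bh := pvVal_bounds ht (fun d hd => hH d (by simp [hd]))
      rw [pvVal_cons, pvVal_cons, hlen']
      unfold pvLexLe at hle
      rw [hlen'] at bl
      rcases hle with h | ⟨h, htl⟩
      · have : (l0 + 1) * 10 ^ ht.length ≤ h0 * 10 ^ ht.length := by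
          apply mul_le_mul_of_nonneg_right (by omega) (by positivity)
        nlinarith [bl.1, bl.2, bh.1, bh.2]
      · have := ih ht hlen' (fun d hd => hL d (by simp [hd])) (fun d hd => hH d (by simp [hd])) htl
        subst h; omega


theorem pvVal_append_sing (ys : List Int) (d : Int) :
    pvVal (ys ++ [d]) = 10 * pvVal ys + d := by
  unfold pvVal
  rw [List.foldl_append]
  rfl

theorem pvVal_zeros_prefix (k : Nat) (xs : List Int) :
    pvVal (List.replicate k 0 ++ xs) = pvVal xs := by
  unfold pvVal
  rw [List.foldl_append]
  congr 1
  induction k with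
  | zero => rfl
  | succ n ih => rw [List.replicate_succ, List.foldl_cons]; simpa using ih

theorem pvVal_of_all_zero : ∀ (L : List Int), L.all (· == 0) = true → pvVal L = 0 := by
  intro L h
  have : L = List.replicate L.length 0 := by
    apply List.eq_replicate_of_mem
    intro b hb
    simpa using (List.all_eq_true.1 h) b hb
  rw [this]
  simpa using pvVal_zeros_prefix L.length []

theorem pvVal_nines : ∀ (n : Nat), pvVal (List.replicate n 9) = 10 ^ n - 1 := by
  intro n
  induction n with
  | zero => simp [pvVal]
  | succ n ih =>
    rw [List.replicate_succ, pvVal_cons, List.length_replicate, ih]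
    ring

def pvDigL (n : Nat) (x : Int) : List Int :=
  (List.range n).map (fun j => (x / 10 ^ (n - 1 - j)) % 10)

theorem pvDigitsB_eq_digL (x : Int) : pvDigitsB x = pvDigL 16 x := by
  unfold pvDigitsB pvDigL
  rw [PySem.List.pyRange_one]
  rw [List.map_map]
  apply List.map_congr_left
  intro j hj
  simp only [List.mem_range] at hj
  simp only [Function.comp]
  rw [PySem.Int.mod_eq_emod_of_pos (by norm_num),
      PySem.Int.floordiv_eq_ediv_of_pos (by positivity)]
  have hE : ((15:Int) - (0 + (j:Int))).toNat = 16 - 1 - j := by omega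
  rw [hE]
theorem pvDigL_len (n : Nat) (x : Int) : (pvDigL n x).length = n := by simp [pvDigL]
theorem pvDigL_dg (n : Nat) (x : Int) : pvDg (pvDigL n x) := by
  intro d hd
  simp only [pvDigL, List.mem_map] at hd
  obtain ⟨j, _, rfl⟩ := hd
  constructor
  · exact Int.emod_nonneg _ (by norm_num)
  · have := Int.emod_lt_of_pos (x / 10 ^ (n - 1 - j)) (show (0:Int) < 10 by norm_num)
    omega

theorem pvDigL_succ (n : Nat) (x : Int) :
    pvDigL (n + 1) x = pvDigL n (x / 10) ++ [x % 10] := by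
  unfold pvDigL
  rw [List.range_succ, List.map_append]
  congr 1
  · apply List.map_congr_left
    intro j hj
    simp only [List.mem_range] at hj
    have h1 : x / 10 / 10 ^ (n - 1 - j) = x / 10 ^ (n + 1 - 1 - j) := by
      rw [Int.ediv_ediv_of_nonneg (by norm_num : (0:ℤ) ≤ 10)]
      congr 1
      rw [← pow_succ']
      congr 1
      omega
    rw [h1]
  · simp

theorem pvDigL_val : ∀ (n : Nat) (x : Int), 0 ≤ x → x < 10 ^ n → pvVal (pvDigL n x) = x := by
  intro n
  induction n with
  | zero => intro x h1 h2; interval_cases x; rfl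
  | succ n ih =>
    intro x h1 h2
    rw [pvDigL_succ, pvVal_append_sing, ih (x / 10) (by positivity)
      (by rw [pow_succ] at h2; omega)]
    omega

-- A-side: str(x) digits
theorem pvDigitVal_digitChar (k : Nat) (hk : k < 10) :
    pvDigitVal (Nat.digitChar k) = (k : Int) := by
  interval_cases k <;> rfl

theorem pv_toDigitsCore_map : ∀ (f m : Nat) (rest : List Char), m < 10 ^ f → 0 < m →
    (Nat.toDigitsCore 10 f m rest).map pvDigitVal =
      ((Nat.digits 10 m).reverse.map Int.ofNat) ++ rest.map pvDigitVal := by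
  intro f
  induction f with
  | zero => intro m rest h1 h2; omega
  | succ f ih =>
    intro m rest h1 h2
    rw [Nat.toDigitsCore]
    by_cases hdiv : m / 10 = 0
    · rw [if_pos hdiv]
      have hm : m < 10 := by omega
      rw [Nat.digits_def' (by norm_num) h2, hdiv]
      simp [Nat.mod_eq_of_lt hm, pvDigitVal_digitChar m hm]
    · rw [if_neg hdiv]
      rw [ih (m / 10) _ (by rw [pow_succ] at h1; omega) (Nat.pos_of_ne_zero hdiv)]
      rw [Nat.digits_def' (by norm_num) h2]
      simp only [List.reverse_cons, List.map_append, List.map_cons, List.map_nil,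
        List.append_assoc, List.cons_append, List.nil_append]
      congr 1
      congr 1
      rw [pvDigitVal_digitChar (m % 10) (Nat.mod_lt _ (by norm_num))]
      rfl

theorem pvVal_rev_digits : ∀ (ds : List Nat),
    pvVal (ds.reverse.map Int.ofNat) = ((Nat.ofDigits 10 ds : Nat) : Int) := by
  intro ds
  induction ds with
  | nil => simp [pvVal]
  | cons d ds ih =>
    simp only [List.reverse_cons, List.map_append, List.map_cons, List.map_nil]
    rw [pvVal_append_sing, ih, Nat.ofDigits_cons]
    push_cast
    simp only [Int.ofNat_eq_natCast]
    ring

-- === part 2 ===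
theorem pv_toDigits_props (m : Nat) (hm16 : m < 10 ^ 16) :
    pvDg ((Nat.toDigits 10 m).map pvDigitVal) ∧
    ((Nat.toDigits 10 m).map pvDigitVal).length ≤ 16 ∧
    pvVal ((Nat.toDigits 10 m).map pvDigitVal) = (m : Int) := by
  by_cases h0 : m = 0
  · subst h0
    have h1 : Nat.toDigits 10 0 = ['0'] := rfl
    rw [h1]
    refine ⟨?_, by simp, by simp [pvVal, pvDigitVal]⟩
    intro d hd
    simp [pvDigitVal] at hd
    subst hd
    norm_num
  · have hfuel : m < 10 ^ (m + 1) := by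
      calc m < 10 ^ m := Nat.lt_pow_self (by norm_num)
        _ ≤ 10 ^ (m + 1) := Nat.pow_le_pow_right (by norm_num) (by omega)
    have hmap : (Nat.toDigitsCore 10 (m + 1) m []).map pvDigitVal =
        ((Nat.digits 10 m).reverse.map Int.ofNat) :=
      (pv_toDigitsCore_map (m + 1) m [] hfuel (Nat.pos_of_ne_zero h0)).trans (by simp)
    rw [Nat.toDigits, hmap]
    refine ⟨?_, ?_, ?_⟩
    · intro d hd
      simp only [List.mem_map, List.mem_reverse] at hd
      obtain ⟨k, hk, rfl⟩ := hd
      have := Nat.digits_lt_base (by norm_num) hk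
      refine ⟨?_, ?_⟩ <;> simp only [Int.ofNat_eq_natCast] <;> omega
    · have h2 := Nat.toDigits_length 10 m 16 (by norm_num) hm16
      rw [Nat.toDigits] at h2
      have := congrArg List.length hmap
      simp only [List.length_map, List.length_reverse] at this ⊢
      omega
    · rw [pvVal_rev_digits, Nat.ofDigits_digits]

theorem pv_toChars_props (x : Int) (hx : 0 ≤ x) (hx16 : x < 10 ^ 16) :
    pvDg ((PySem.Int.toChars x).map pvDigitVal) ∧
    ((PySem.Int.toChars x).map pvDigitVal).length ≤ 16 ∧
    pvVal ((PySem.Int.toChars x).map pvDigitVal) = x := by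
  have hneg : ¬ x < 0 := by omega
  rw [PySem.Int.toChars, if_neg hneg]
  have hxm : (x.toNat : Int) = x := Int.toNat_of_nonneg hx
  have hm16 : x.toNat < 10 ^ 16 := by
    have h2 : ((x.toNat : ℤ)) < ((10 ^ 16 : ℕ) : ℤ) := by rw [hxm]; push_cast; exact hx16
    exact_mod_cast h2
  obtain ⟨a, b, c⟩ := pv_toDigits_props x.toNat hm16
  exact ⟨a, b, by rw [c, hxm]⟩


theorem pvDigitsB_len (x : Int) : (pvDigitsB x).length = 16 := by
  rw [pvDigitsB_eq_digL, pvDigL_len]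
theorem pvDigitsB_dg (x : Int) (hx : 0 ≤ x) : pvDg (pvDigitsB x) := by
  rw [pvDigitsB_eq_digL]; exact pvDigL_dg 16 x
theorem pvDigitsB_val (x : Int) (hx : 0 ≤ x) (hx16 : x < 10 ^ 16) :
    pvVal (pvDigitsB x) = x := by
  rw [pvDigitsB_eq_digL]; exact pvDigL_val 16 x hx hx16

theorem pvAdigits_eq (x : Int) (hx : 0 ≤ x) (hx16 : x < 10 ^ 16) :
    List.replicate (16 - ((PySem.Int.toChars x).map pvDigitVal).length) 0 ++
      (PySem.Int.toChars x).map pvDigitVal = pvDigitsB x := by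
  obtain ⟨hdg, hlen, hval⟩ := pv_toChars_props x hx hx16
  apply pvVal_uniq
  · rw [List.length_append, List.length_replicate, pvDigitsB_len]; omega
  · intro d hd
    rcases List.mem_append.1 hd with h | h
    · have := List.eq_of_mem_replicate h; subst this; norm_num
    · exact hdg d h
  · exact pvDigitsB_dg x hx
  · rw [pvVal_zeros_prefix, hval, pvDigitsB_val x hx hx16]


theorem pvBorrow_dg : ∀ (L : List Int), pvDg L → ¬ (L.all (· == 0) = true) →
    pvDg (pvBorrow L) := by
  intro L
  induction L with
  | nil => intro _ h; simp at h
  | cons l0 lt ih =>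
    intro hdg hnz
    rw [pvBorrow]
    split
    · rename_i hz
      have hl0 : l0 ≠ 0 := by
        intro h; exact hnz (by subst h; simp [hz])
      have := hdg l0 (by simp)
      intro d hd
      rcases List.mem_cons.1 hd with h | h
      · subst h; omega
      · have := List.eq_of_mem_replicate h; omega
    · rename_i hz
      intro d hd
      rcases List.mem_cons.1 hd with h | h
      · rw [h]; exact hdg l0 (by simp)
      · exact ih (fun e he => hdg e (by simp [he])) (by simpa using hz) d h

theorem pvBorrow_val : ∀ (L : List Int), pvDg L → ¬ (L.all (· == 0) = true) →
    pvVal (pvBorrow L) = pvVal L - 1 := by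
  intro L
  induction L with
  | nil => intro _ h; simp at h
  | cons l0 lt ih =>
    intro hdg hnz
    rw [pvBorrow]
    split
    · rename_i hz
      rw [pvVal_cons, pvVal_cons, List.length_replicate, pvVal_nines,
        pvVal_of_all_zero lt hz]
      ring
    · rename_i hz
      rw [pvVal_cons, pvVal_cons, pvBorrow_len,
        ih (fun e he => hdg e (by simp [he])) (by simpa using hz)]
      ring

theorem pvBorrow_digits (x : Int) (hx : 1 ≤ x) (hx16 : x < 10 ^ 16) :
    pvBorrow (pvDigitsB x) = pvDigitsB (x - 1) := by
  have hnz : ¬ ((pvDigitsB x).all (· == 0) = true) := by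
    intro h
    have := pvVal_of_all_zero _ h
    rw [pvDigitsB_val x (by omega) hx16] at this
    omega
  have hdg := pvDigitsB_dg x (by omega)
  apply pvVal_uniq
  · rw [pvBorrow_len, pvDigitsB_len, pvDigitsB_len]
  · exact pvBorrow_dg _ hdg hnz
  · exact pvDigitsB_dg (x - 1) (by omega)
  · rw [pvBorrow_val _ hdg hnz, pvDigitsB_val x (by omega) hx16,
      pvDigitsB_val (x - 1) (by omega) (by omega)]


theorem pvMarks_fold : ∀ (cs : List Char) (li : List Int) (i : Int),
    cs.foldl (fun (s : PySem.Set Int × Int) c =>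
        let pos := s.2 + (if c = 'R' then 1 else 4)
        (PySem.Set.add s.1 pos, pos)) (PySem.Set.ofList li, i) =
      (PySem.Set.ofList ((cs.foldl (fun (s : List Int × Int) dir =>
        let i := if dir = 'R' then s.2 + 1 else s.2 + 4
        (s.1 ++ [i], i)) (li, i)).1),
       (cs.foldl (fun (s : List Int × Int) dir =>
        let i := if dir = 'R' then s.2 + 1 else s.2 + 4
        (s.1 ++ [i], i)) (li, i)).2) := by
  intro cs
  induction cs with
  | nil => intro li i; rfl
  | cons c cs ih =>
    intro li i
    simp only [List.foldl_cons]
    have h1 : i + (if c = 'R' then 1 else 4) = (if c = 'R' then i + 1 else i + 4) := by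
      split <;> ring
    have h2 : PySem.Set.add (PySem.Set.ofList li) (if c = 'R' then i + 1 else i + 4) =
        PySem.Set.ofList (li ++ [if c = 'R' then i + 1 else i + 4]) := by
      rw [PySem.Set.ofList_eq_foldl, PySem.Set.ofList_eq_foldl, List.foldl_append]
      rfl
    rw [h1, h2]
    exact ih _ _

theorem pvMarks_eq (directions : String) :
    (directions.toList.foldl
      (fun (s : PySem.Set Int × Int) c =>
        let pos := s.2 + (if c = 'R' then 1 else 4)
        (PySem.Set.add s.1 pos, pos)) (PySem.Set.add PySem.Set.empty 0, 0)).1 =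
    PySem.Set.ofList ((directions.toList.foldl
      (fun (s : List Int × Int) dir =>
        let i := if dir = 'R' then s.2 + 1 else s.2 + 4
        (s.1 ++ [i], i)) ([0], 0)).1) := by
  have h0 : (PySem.Set.add PySem.Set.empty (0:Int)) = PySem.Set.ofList [0] := rfl
  rw [h0, pvMarks_fold directions.toList [0] 0]

def pvMemoOkA (st : PySem.Set Int) (Lb Hb : List Int)
    (m : PySem.Dict (Int × Int × Bool × Bool) Int) : Prop :=
  ∀ (i pre : Int) (bL bH : Bool) (v : Int), PySem.Dict.get? m (i, pre, bL, bH) = some v →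
    v = pvDfsA st (Lb.drop i.toNat) (Hb.drop i.toNat) i pre bL bH

theorem pvDfsAC_correct (st : PySem.Set Int) (Lb Hb : List Int) :
    ∀ (lows highs : List Int) (i pre : Int) (bL bH : Bool)
      (m : PySem.Dict (Int × Int × Bool × Bool) Int),
      lows = Lb.drop i.toNat → highs = Hb.drop i.toNat → 0 ≤ i → pvMemoOkA st Lb Hb m →
      (pvDfsAC st lows highs i pre bL bH m).1 = pvDfsA st lows highs i pre bL bH ∧
        pvMemoOkA st Lb Hb (pvDfsAC st lows highs i pre bL bH m).2 := by
  intro lows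
  induction lows with
  | nil =>
    intro highs i pre bL bH m _ _ _ hm
    cases highs with
    | nil => exact ⟨rfl, hm⟩
    | cons _ _ => exact ⟨rfl, hm⟩
  | cons l0 lt ih =>
    intro highs i pre bL bH m hLd hHd hi0 hm
    cases highs with
    | nil => exact ⟨rfl, hm⟩
    | cons h0 ht =>
      have hLd' : lt = Lb.drop (i + 1).toNat := by
        have h1 : Lb.drop (i.toNat + 1) = (l0 :: lt).drop 1 := by
          rw [hLd, List.drop_drop]
        simp at h1
        rw [show (i + 1).toNat = i.toNat + 1 by omega, h1]
      have hHd' : ht = Hb.drop (i + 1).toNat := by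
        have h1 : Hb.drop (i.toNat + 1) = (h0 :: ht).drop 1 := by
          rw [hHd, List.drop_drop]
        simp at h1
        rw [show (i + 1).toNat = i.toNat + 1 by omega, h1]
      rcases hget : PySem.Dict.get? m (i, pre, bL, bH) with _ | v
      · -- cache miss: compute, then memoise
        have hunfold : pvDfsAC st (l0 :: lt) (h0 :: ht) i pre bL bH m =
            (let lo := if bL then l0 else 0
             let hi := if bH then h0 else 9
             let flag := PySem.Set.contains st i
             let start := if flag then (if 0 < i then max lo pre else lo) else lo
             let p := (PySem.List.pyRange start (hi + 1)).foldl
               (fun (acc : Int × PySem.Dict (Int × Int × Bool × Bool) Int) d =>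
                 let r := pvDfsAC st lt ht (i + 1) (if flag then d else pre)
                   (bL && (d == lo)) (bH && (d == hi)) acc.2
                 (acc.1 + r.1, r.2)) (0, m)
             (p.1, PySem.Dict.insert p.2 (i, pre, bL, bH) p.1)) := by
          rw [pvDfsAC, hget]
        rw [hunfold]
        have hplain : pvDfsA st (l0 :: lt) (h0 :: ht) i pre bL bH =
            pvS (if PySem.Set.contains st i then
                   (if 0 < i then max (if bL then l0 else 0) pre else (if bL then l0 else 0))
                 else (if bL then l0 else 0)) ((if bH then h0 else 9) + 1)
              (fun d => pvDfsA st lt ht (i + 1) (if PySem.Set.contains st i then d else pre)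
                  (bL && (d == (if bL then l0 else 0))) (bH && (d == (if bH then h0 else 9)))) :=
          pvDfsA_cons st l0 h0 i pre lt ht bL bH
        have inner : ∀ (ds : List Int) (a : Int)
            (m0 : PySem.Dict (Int × Int × Bool × Bool) Int), pvMemoOkA st Lb Hb m0 →
            (ds.foldl (fun (acc : Int × PySem.Dict (Int × Int × Bool × Bool) Int) d =>
                let r := pvDfsAC st lt ht (i + 1)
                  (if PySem.Set.contains st i then d else pre)
                  (bL && (d == (if bL then l0 else 0))) (bH && (d == (if bH then h0 else 9))) acc.2
                (acc.1 + r.1, r.2)) (a, m0)).1 =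
              a + (ds.map (fun d => pvDfsA st lt ht (i + 1)
                  (if PySem.Set.contains st i then d else pre)
                  (bL && (d == (if bL then l0 else 0)))
                  (bH && (d == (if bH then h0 else 9))))).sum ∧
            pvMemoOkA st Lb Hb
              ((ds.foldl (fun (acc : Int × PySem.Dict (Int × Int × Bool × Bool) Int) d =>
                let r := pvDfsAC st lt ht (i + 1)
                  (if PySem.Set.contains st i then d else pre)
                  (bL && (d == (if bL then l0 else 0))) (bH && (d == (if bH then h0 else 9))) acc.2
                (acc.1 + r.1, r.2)) (a, m0)).2) := by
          intro ds
          induction ds with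
          | nil => intro a m0 hm0; exact ⟨by simp, hm0⟩
          | cons d ds ihd =>
            intro a m0 hm0
            obtain ⟨hc1, hc2⟩ := ih ht (i + 1)
              (if PySem.Set.contains st i then d else pre)
              (bL && (d == (if bL then l0 else 0))) (bH && (d == (if bH then h0 else 9)))
              m0 hLd' hHd' (by omega) hm0
            simp only [List.foldl_cons, List.map_cons, List.sum_cons]
            obtain ⟨hd1, hd2⟩ := ihd (a + (pvDfsAC st lt ht (i + 1)
              (if PySem.Set.contains st i then d else pre)
              (bL && (d == (if bL then l0 else 0))) (bH && (d == (if bH then h0 else 9))) m0).1)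
              ((pvDfsAC st lt ht (i + 1)
              (if PySem.Set.contains st i then d else pre)
              (bL && (d == (if bL then l0 else 0))) (bH && (d == (if bH then h0 else 9))) m0).2) hc2
            refine ⟨?_, hd2⟩
            rw [hd1, hc1]
            ring
        obtain ⟨hf1, hf2⟩ := inner
          (PySem.List.pyRange (if PySem.Set.contains st i then
              (if 0 < i then max (if bL then l0 else 0) pre else (if bL then l0 else 0))
            else (if bL then l0 else 0)) ((if bH then h0 else 9) + 1)) 0 m hm
        constructor
        · show _ = pvDfsA st (l0 :: lt) (h0 :: ht) i pre bL bH
          rw [hplain]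
          unfold pvS
          rw [hf1]
          ring
        · intro i' pre' bL' bH' v' hv'
          by_cases hk : (i', pre', bL', bH') = ((i, pre, bL, bH) : Int × Int × Bool × Bool)
          · have e := hk
            injection e with e1 e
            injection e with e2 e
            injection e with e3 e4
            subst e1; subst e2; subst e3; subst e4
            rw [PySem.Dict.get?_insert_self] at hv'
            injection hv' with hv''
            rw [← hv'', ← hLd, ← hHd]
            rw [hplain]
            unfold pvS
            rw [hf1]
            ring
          · rw [PySem.Dict.get?_insert_of_ne _ _ hk] at hv'
            exact hf2 i' pre' bL' bH' v' hv'
      · -- cache hit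
        have hunfold : pvDfsAC st (l0 :: lt) (h0 :: ht) i pre bL bH m = (v, m) := by
          rw [pvDfsAC, hget]
        rw [hunfold]
        refine ⟨?_, hm⟩
        have := hm i pre bL bH v hget
        rw [← hLd, ← hHd] at this
        show v = _
        exact this

def pvMemoOkB (st : PySem.Set Int) (Db : List Int)
    (m : PySem.Dict (Int × Int × Bool) Int) : Prop :=
  ∀ (j pre : Int) (t : Bool) (v : Int), PySem.Dict.get? m (j, pre, t) = some v →
    v = pvDfsB st (Db.drop j.toNat) j pre t

theorem pvDfsBC_correct (st : PySem.Set Int) (Db : List Int) :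
    ∀ (ds : List Int) (j pre : Int) (t : Bool) (m : PySem.Dict (Int × Int × Bool) Int),
      ds = Db.drop j.toNat → 0 ≤ j → pvMemoOkB st Db m →
      (pvDfsBC st ds j pre t m).1 = pvDfsB st ds j pre t ∧
        pvMemoOkB st Db (pvDfsBC st ds j pre t m).2 := by
  intro ds
  induction ds with
  | nil => intro j pre t m _ _ hm; exact ⟨rfl, hm⟩
  | cons d0 dt ih =>
    intro j pre t m hDd hj0 hm
    have hDd' : dt = Db.drop (j + 1).toNat := by
      have h1 : Db.drop (j.toNat + 1) = (d0 :: dt).drop 1 := by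
        rw [hDd, List.drop_drop]
      simp at h1
      rw [show (j + 1).toNat = j.toNat + 1 by omega, h1]
    rcases hget : PySem.Dict.get? m (j, pre, t) with _ | v
    · have hunfold : pvDfsBC st (d0 :: dt) j pre t m =
          (let hi := if t then d0 else 9
           let p :=
             if PySem.Set.contains st j then
               (PySem.List.pyRange (max pre 0) (hi + 1)).foldl
                 (fun (acc : Int × PySem.Dict (Int × Int × Bool) Int) d =>
                   let r := pvDfsBC st dt (j + 1) d (t && (d == hi)) acc.2
                   (acc.1 + r.1, r.2)) (0, m)
             else
               (PySem.List.pyRange 0 (hi + 1)).foldl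
                 (fun (acc : Int × PySem.Dict (Int × Int × Bool) Int) d =>
                   let r := pvDfsBC st dt (j + 1) pre (t && (d == hi)) acc.2
                   (acc.1 + r.1, r.2)) (0, m)
           (p.1, PySem.Dict.insert p.2 (j, pre, t) p.1)) := by
        rw [pvDfsBC, hget]
      rw [hunfold]
      have hplain : pvDfsB st (d0 :: dt) j pre t =
          pvS (if PySem.Set.contains st j then max pre 0 else 0) ((if t then d0 else 9) + 1)
            (fun d => pvDfsB st dt (j + 1) (if PySem.Set.contains st j then d else pre)
                (t && (d == (if t then d0 else 9)))) :=
        pvDfsB_cons st d0 j pre dt t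
      -- the two fold shapes (marked / unmarked), handled by one generic inner lemma
      have innerM : ∀ (xs : List Int) (a : Int)
          (m0 : PySem.Dict (Int × Int × Bool) Int), pvMemoOkB st Db m0 →
          ((xs.foldl (fun (acc : Int × PySem.Dict (Int × Int × Bool) Int) d =>
              let r := pvDfsBC st dt (j + 1) d (t && (d == (if t then d0 else 9))) acc.2
              (acc.1 + r.1, r.2)) (a, m0)).1 =
            a + (xs.map (fun d => pvDfsB st dt (j + 1) d
                (t && (d == (if t then d0 else 9))))).sum ∧
          pvMemoOkB st Db
            ((xs.foldl (fun (acc : Int × PySem.Dict (Int × Int × Bool) Int) d =>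
              let r := pvDfsBC st dt (j + 1) d (t && (d == (if t then d0 else 9))) acc.2
              (acc.1 + r.1, r.2)) (a, m0)).2)) := by
        intro xs
        induction xs with
        | nil => intro a m0 hm0; exact ⟨by simp, hm0⟩
        | cons x xs ihx =>
          intro a m0 hm0
          obtain ⟨hc1, hc2⟩ := ih (j + 1) x (t && (x == (if t then d0 else 9))) m0
            hDd' (by omega) hm0
          simp only [List.foldl_cons, List.map_cons, List.sum_cons]
          obtain ⟨hd1, hd2⟩ := ihx (a + (pvDfsBC st dt (j + 1) x
            (t && (x == (if t then d0 else 9))) m0).1)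
            ((pvDfsBC st dt (j + 1) x (t && (x == (if t then d0 else 9))) m0).2) hc2
          refine ⟨?_, hd2⟩
          rw [hd1, hc1]
          ring
      have innerU : ∀ (xs : List Int) (a : Int)
          (m0 : PySem.Dict (Int × Int × Bool) Int), pvMemoOkB st Db m0 →
          ((xs.foldl (fun (acc : Int × PySem.Dict (Int × Int × Bool) Int) d =>
              let r := pvDfsBC st dt (j + 1) pre (t && (d == (if t then d0 else 9))) acc.2
              (acc.1 + r.1, r.2)) (a, m0)).1 =
            a + (xs.map (fun d => pvDfsB st dt (j + 1) pre
                (t && (d == (if t then d0 else 9))))).sum ∧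
          pvMemoOkB st Db
            ((xs.foldl (fun (acc : Int × PySem.Dict (Int × Int × Bool) Int) d =>
              let r := pvDfsBC st dt (j + 1) pre (t && (d == (if t then d0 else 9))) acc.2
              (acc.1 + r.1, r.2)) (a, m0)).2)) := by
        intro xs
        induction xs with
        | nil => intro a m0 hm0; exact ⟨by simp, hm0⟩
        | cons x xs ihx =>
          intro a m0 hm0
          obtain ⟨hc1, hc2⟩ := ih (j + 1) pre (t && (x == (if t then d0 else 9))) m0
            hDd' (by omega) hm0
          simp only [List.foldl_cons, List.map_cons, List.sum_cons]
          obtain ⟨hd1, hd2⟩ := ihx (a + (pvDfsBC st dt (j + 1) pre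
            (t && (x == (if t then d0 else 9))) m0).1)
            ((pvDfsBC st dt (j + 1) pre (t && (x == (if t then d0 else 9))) m0).2) hc2
          refine ⟨?_, hd2⟩
          rw [hd1, hc1]
          ring
      by_cases hcm : PySem.Set.contains st j = true
      · simp only [hcm, if_true] at hplain ⊢
        obtain ⟨hf1, hf2⟩ := innerM
          (PySem.List.pyRange (max pre 0) ((if t then d0 else 9) + 1)) 0 m hm
        constructor
        · show _ = pvDfsB st (d0 :: dt) j pre t
          rw [hplain]
          unfold pvS
          rw [hf1]
          ring
        · intro j' pre' t' v' hv'
          by_cases hk : (j', pre', t') = ((j, pre, t) : Int × Int × Bool)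
          · have e := hk
            injection e with e1 e
            injection e with e2 e3
            subst e1; subst e2; subst e3
            rw [PySem.Dict.get?_insert_self] at hv'
            injection hv' with hv''
            rw [← hv'', ← hDd]
            rw [hplain]
            unfold pvS
            rw [hf1]
            ring
          · rw [PySem.Dict.get?_insert_of_ne _ _ hk] at hv'
            exact hf2 j' pre' t' v' hv'
      · simp only [Bool.not_eq_true] at hcm
        simp only [hcm, Bool.false_eq_true, if_false] at hplain ⊢
        obtain ⟨hf1, hf2⟩ := innerU
          (PySem.List.pyRange 0 ((if t then d0 else 9) + 1)) 0 m hm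
        constructor
        · show _ = pvDfsB st (d0 :: dt) j pre t
          rw [hplain]
          unfold pvS
          rw [hf1]
          ring
        · intro j' pre' t' v' hv'
          by_cases hk : (j', pre', t') = ((j, pre, t) : Int × Int × Bool)
          · have e := hk
            injection e with e1 e
            injection e with e2 e3
            subst e1; subst e2; subst e3
            rw [PySem.Dict.get?_insert_self] at hv'
            injection hv' with hv''
            rw [← hv'', ← hDd]
            rw [hplain]
            unfold pvS
            rw [hf1]
            ring
          · rw [PySem.Dict.get?_insert_of_ne _ _ hk] at hv'
            exact hf2 j' pre' t' v' hv'
    · have hunfold : pvDfsBC st (d0 :: dt) j pre t m = (v, m) := by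
        rw [pvDfsBC, hget]
      rw [hunfold]
      refine ⟨?_, hm⟩
      have := hm j pre t v hget
      rw [← hDd] at this
      show v = _
      exact this

-- ===== assembly =====
def pvLiFold (directions : String) : List Int × Int :=
  directions.toList.foldl
    (fun (s : List Int × Int) dir =>
      let i := if dir = 'R' then s.2 + 1 else s.2 + 4
      (s.1 ++ [i], i)) ([0], 0)

def pvBFold (directions : String) : PySem.Set Int × Int :=
  directions.toList.foldl
    (fun (s : PySem.Set Int × Int) c =>
      let pos := s.2 + (if c = 'R' then 1 else 4)
      (PySem.Set.add s.1 pos, pos)) (PySem.Set.add PySem.Set.empty 0, 0)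

def pvPadA (x : Int) : List Int :=
  List.replicate (16 - ((PySem.Int.toChars x).map pvDigitVal).length) 0 ++
    (PySem.Int.toChars x).map pvDigitVal

theorem pv_bfold_eq (directions : String) :
    (pvBFold directions).1 = PySem.Set.ofList (pvLiFold directions).1 :=
  pvMarks_eq directions

theorem pvMemoOkA_empty (st : PySem.Set Int) (Lb Hb : List Int) :
    pvMemoOkA st Lb Hb PySem.Dict.empty := by
  intro i pre bL bH v hv
  simp [pysem] at hv

theorem pvMemoOkB_empty (st : PySem.Set Int) (Db : List Int) :
    pvMemoOkB st Db PySem.Dict.empty := by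
  intro j pre t v hv
  simp [pysem] at hv

theorem pv_portA_plain (l r : Int) (directions : String) :
    countGoodIntegersOnPath l r directions =
      pvDfsA (PySem.Set.ofList (pvLiFold directions).1) (pvPadA l) (pvPadA r) 0 (-1)
        true true :=
  (pvDfsAC_correct (PySem.Set.ofList (pvLiFold directions).1) (pvPadA l) (pvPadA r)
    (pvPadA l) (pvPadA r) 0 (-1) true true PySem.Dict.empty (by simp) (by simp) le_rfl
    (pvMemoOkA_empty _ _ _)).1

-- the memo-free value of B's g
def pvGP (marked : PySem.Set Int) (x : Int) : Int :=
  if x < 0 then 0 else pvDfsB marked (pvDigitsB x) 0 (-1) true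

theorem pvG_eq (marked : PySem.Set Int) (x : Int) : pvG marked x = pvGP marked x := by
  unfold pvG pvGP
  split
  · rfl
  · exact (pvDfsBC_correct marked (pvDigitsB x) (pvDigitsB x) 0 (-1) true PySem.Dict.empty
      (by simp) le_rfl (pvMemoOkB_empty _ _)).1

theorem pv_portB_plain (l r : Int) (directions : String) :
    countGoodIntegersOnPath_alt l r directions =
      if l > r then 0
      else pvGP (PySem.Set.ofList (pvLiFold directions).1) r -
        pvGP (PySem.Set.ofList (pvLiFold directions).1) (l - 1) := by
  have h1 : countGoodIntegersOnPath_alt l r directions =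
      if l > r then 0 else pvG (pvBFold directions).1 r - pvG (pvBFold directions).1 (l - 1) :=
    rfl
  rw [h1, pv_bfold_eq directions, pvG_eq, pvG_eq]

theorem pvDigitsB_zero : pvDigitsB 0 = List.replicate 16 0 := by
  apply pvVal_uniq _ _ (by rw [pvDigitsB_len, List.length_replicate])
    (pvDigitsB_dg 0 le_rfl) (by intro d hd; have := List.eq_of_mem_replicate hd; omega)
  rw [pvDigitsB_val 0 le_rfl (by norm_num)]
  have := pvVal_zeros_prefix 16 ([] : List Int)
  simp only [List.append_nil] at this
  rw [this]
  rfl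

-- ===== VERDICT (by name: the statement is the Claim_ definition above) =====
theorem countGoodIntegersOnPath_spec : Claim_equal_countGoodIntegersOnPath := by
  intro l r directions hdom hpre
  obtain ⟨hl, hr⟩ := hpre
  have hdom' : l ≤ 2147483648 ∧ r ≤ 2147483648 := by
    unfold Dom_countGoodIntegersOnPath at hdom
    simp only [Bool.and_eq_true, pvDomInt, decide_eq_true_eq] at hdom
    exact ⟨hdom.1.1.2, hdom.1.2.2⟩
  have hpow : (10:Int) ^ 16 = 10000000000000000 := by norm_num
  have hl16 : l < 10 ^ 16 := by omega
  have hr16 : r < 10 ^ 16 := by omega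
  unfold Spec_countGoodIntegersOnPath
  rw [pv_portA_plain, pv_portB_plain]
  have hlowA : pvPadA l = pvDigitsB l := pvAdigits_eq l hl hl16
  have hhighA : pvPadA r = pvDigitsB r := pvAdigits_eq r hr hr16
  rw [hlowA, hhighA]
  have hlen : (pvDigitsB l).length = (pvDigitsB r).length := by
    rw [pvDigitsB_len, pvDigitsB_len]
  have hdgl := pvDigitsB_dg l hl
  have hdgr := pvDigitsB_dg r hr
  set st := PySem.Set.ofList (pvLiFold directions).1 with hst
  by_cases hlr : l > r
  · rw [if_pos hlr]
    apply pv_main_gt st _ _ 0 (-1) hlen hdgl hdgr _ le_rfl (fun _ => rfl)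
    intro hlex
    have := pv_le_of_lex _ _ hlen hdgl hdgr hlex
    rw [pvDigitsB_val l hl hl16, pvDigitsB_val r hr hr16] at this
    omega
  · rw [if_neg hlr]
    have hlex : pvLexLe (pvDigitsB l) (pvDigitsB r) := by
      by_contra hnl
      have := pv_lex_of_not_lt _ _ hlen hdgl hdgr hnl
      rw [pvDigitsB_val l hl hl16, pvDigitsB_val r hr hr16] at this
      omega
    rw [pv_main st _ _ 0 (-1) hlen hdgl hdgr hlex le_rfl (fun _ => rfl)]
    unfold pvGP
    rw [if_neg (show ¬ r < 0 by omega)]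
    by_cases hl0 : l = 0
    · subst hl0
      rw [if_pos (show (0:Int) - 1 < 0 by norm_num)]
      rw [pvDigitsB_zero, pv_zeros st 16 0 (-1)]
      ring
    · rw [if_neg (show ¬ l - 1 < 0 by omega)]
      rw [← pvBorrow_digits l (by omega) hl16]
      rw [pv_borrow st _ 0 (-1) hdgl
        (by
          intro hz
          have := pvVal_of_all_zero _ hz
          rw [pvDigitsB_val l hl hl16] at this
          omega)
        le_rfl (fun _ => rfl)]
      ring
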